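-- pv_equiv track=rewrite | github.com/Ypsilonx/AdventOfCode_2024 | Day_16/Day_16_part2.py | find_best_paths
-- ===== SOURCE A (Python) =====
-- from collections import deque, defaultdict
-- from typing import List, Set, Tuple, Dict
--
-- def find_best_paths(maze: List[str]) -> Set[tuple[int, int]]:
--     height = len(maze)
--     width = len(maze[0])
--
--     # Najít start a cíl
--     start_x = start_y = end_x = end_y = 0
--     for y in range(height):
--         for x in range(width):
--             if maze[y][x] == 'S':
--                 start_x, start_y = x, y
--             elif maze[y][x] == 'E':
--                 end_x, end_y = x, y
--
--     # Směry pohybu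
--     directions = [(0, 1), (1, 0), (0, -1), (-1, 0)]  # vpravo, dolů, vlevo, nahoru
--
--     # BFS
--     queue = deque([(start_x, start_y, [(start_x, start_y)])])
--     visited = set()
--     best_paths = []
--     min_length = float('inf')
--
--     while queue:
--         x, y, path = queue.popleft()
--
--         # Jsme v cíli?
--         if x == end_x and y == end_y:
--             path_length = len(path)
--             if path_length < min_length:
--                 min_length = path_length
--                 best_paths = [path]
--             elif path_length == min_length:
--                 best_paths.append(path)
--             continue
--
--         # Pokud je cesta už delší než nejlepší nalezená, ignorujeme ji
--         if len(path) > min_length: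
--             continue
--
--         for dx, dy in directions:
--             new_x, new_y = x + dx, y + dy
--
--             if (0 <= new_x < width and 0 <= new_y < height and
--                 maze[new_y][new_x] != '#' and
--                 (new_x, new_y) not in path):  # Vyhýbáme se cyklům
--                 new_path = path + [(new_x, new_y)]
--                 queue.append((new_x, new_y, new_path))
--
--     # Shromáždit všechna unikátní políčka ze všech nejlepších cest
--     path_tiles = set()
--     for path in best_paths:
--         path_tiles.update(path)
--
--     return path_tiles
-- ===== SOURCE B (Python) =====
-- def find_best_paths(maze):
--     height = len(maze)
--     width = len(maze[0])
--
--     start = end = (0, 0)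
--     for y, row in enumerate(maze):
--         for x, ch in enumerate(row[:width]):
--             if ch == 'S':
--                 start = (x, y)
--             elif ch == 'E':
--                 end = (x, y)
--
--     def steps(p):
--         x, y = p[-1]
--         out = []
--         for c in ((x, y + 1), (x + 1, y), (x, y - 1), (x - 1, y)):
--             if (0 <= c[0] < width and 0 <= c[1] < height
--                     and maze[c[1]][c[0]] != '#' and c not in p):
--                 out.append(p + [c])
--         return out
--
--     frontier = [[start]]
--     while frontier:
--         done = [p for p in frontier if p[-1] == end]
--         if done:
--             tiles = set()
--             for p in done:
--                 tiles.update(p)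
--             return tiles
--         frontier = [q for p in frontier for q in steps(p)]
--     return set()
-- ===== Notes on version B (the rewrite author's own statement) =====
-- stated objective: simpler
-- what changed: A runs a FIFO queue of (cell, path) items with min-length tracking, pruning and a best-paths accumulator; B generates the simple paths level by level (whole frontier at once), stops at the first level that reaches 'E', and returns the union of that level's finishing paths, so queue, min_length, pruning and the best-paths bookkeeping all disappear.
import Mathlib
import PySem

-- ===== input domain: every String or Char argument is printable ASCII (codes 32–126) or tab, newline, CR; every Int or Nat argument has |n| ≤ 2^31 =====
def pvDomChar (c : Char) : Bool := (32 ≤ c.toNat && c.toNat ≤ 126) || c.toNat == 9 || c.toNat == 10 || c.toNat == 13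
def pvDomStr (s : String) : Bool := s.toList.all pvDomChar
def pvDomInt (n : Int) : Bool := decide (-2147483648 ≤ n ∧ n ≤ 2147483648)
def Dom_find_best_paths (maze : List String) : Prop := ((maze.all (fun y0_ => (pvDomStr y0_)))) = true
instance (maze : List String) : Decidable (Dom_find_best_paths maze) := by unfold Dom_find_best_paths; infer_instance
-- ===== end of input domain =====

-- B replaces A's FIFO queue of (cell, path) items with min-length tracking and pruning by a
-- level-synchronised breadth-first generation of simple paths that stops at the first level
-- reaching 'E' (objective: simpler; same exponential worst case).

-- maze[y][x]; none exactly where Python raises IndexError (excluded by Pre_)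
def pvCell (maze : List String) (y x : Int) : Option Char :=
  (PySem.List.pyGet? maze y).bind fun row => PySem.Str.pyGet? row x

-- ===== PORT A =====
-- the two nested 'for' loops locating 'S' and 'E' (last occurrence wins, as in Python)
def pvScanA (maze : List String) (height width : Int) : (Int × Int) × (Int × Int) :=
  (PySem.List.pyRange 0 height 1).foldl (fun st y =>
    (PySem.List.pyRange 0 width 1).foldl (fun st x =>
      if pvCell maze y x = some 'S' then ((x, y), st.2)
      else if pvCell maze y x = some 'E' then (st.1, (x, y))
      else st) st) ((0, 0), (0, 0))

def pvDirs : List (Int × Int) := [(0, 1), (1, 0), (0, -1), (-1, 0)]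

-- the inner 'for dx, dy in directions' loop: the items queue.append'ed while popping (x, y, path)
def pvChildrenA (maze : List String) (width height x y : Int) (path : List (Int × Int)) :
    List (Int × Int × List (Int × Int)) :=
  pvDirs.foldl (fun q d =>
    let nx := x + d.1
    let ny := y + d.2
    if 0 ≤ nx ∧ nx < width ∧ 0 ≤ ny ∧ ny < height ∧
        pvCell maze ny nx ≠ some '#' ∧ (nx, ny) ∉ path
    then q ++ [(nx, ny, path ++ [(nx, ny)])]
    else q) []

-- the 'while queue' loop; min? = none models min_length = float('inf'); the Nat fuel is a
-- totality guard only (5 ^ (H·W+3) pops are proved sufficient below on Pre_ inputs);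
-- 'visited' in the Python is dead code (never written), so it has no counterpart here
def pvLoopA (maze : List String) (width height ex ey : Int) :
    Nat → List (Int × Int × List (Int × Int)) → Option Nat → List (List (Int × Int)) →
    List (List (Int × Int))
  | 0, _, _, best => best
  | Nat.succ _, [], _, best => best
  | Nat.succ f, (x, y, path) :: q, min?, best =>
    if x = ex ∧ y = ey then
      match min? with
      | none => pvLoopA maze width height ex ey f q (some path.length) [path]
      | some m =>
        if path.length < m then pvLoopA maze width height ex ey f q (some path.length) [path]
        else if path.length = m then pvLoopA maze width height ex ey f q (some m) (best ++ [path])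
        else pvLoopA maze width height ex ey f q (some m) best
    else
      match min? with
      | some m =>
        if m < path.length then pvLoopA maze width height ex ey f q (some m) best
        else pvLoopA maze width height ex ey f
              (q ++ pvChildrenA maze width height x y path) (some m) best
      | none => pvLoopA maze width height ex ey f
              (q ++ pvChildrenA maze width height x y path) none best

-- 'path_tiles = set(); for path in best_paths: path_tiles.update(path)'
def pvTilesA (paths : List (List (Int × Int))) : List (Int × Int) :=
  paths.foldl (fun s p => PySem.Set.update s p) PySem.Set.empty

def find_best_paths (maze : List String) : List (Int × Int) :=
  let height : Int := PySem.List.len maze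
  let width : Int := PySem.Str.len (maze.headD "")  -- maze[0]; raises on [] (outside Pre_)
  let se := pvScanA maze height width
  pvTilesA (pvLoopA maze width height se.2.1 se.2.2
    (5 ^ (maze.length * (maze.headD "").toList.length + 3))
    [(se.1.1, se.1.2, [(se.1.1, se.1.2)])] none [])

-- ===== PORT B =====
-- 'for y, row in enumerate(maze): for x, ch in enumerate(row[:width])'
def pvScanB (maze : List String) (width : Int) : (Int × Int) × (Int × Int) :=
  (PySem.List.enumerate maze).foldl (fun st yr =>
    (PySem.List.enumerate (PySem.List.slice yr.2.toList none (some width))).foldl (fun st xc =>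
      if xc.2 = 'S' then ((xc.1, yr.1), st.2)
      else if xc.2 = 'E' then (st.1, (xc.1, yr.1))
      else st) st) ((0, 0), (0, 0))

-- 'steps(p)': the successor paths of p (p[-1] is its last cell; frontier paths are nonempty)
def pvStepsB (maze : List String) (width height : Int) (p : List (Int × Int)) :
    List (List (Int × Int)) :=
  match p.getLast? with
  | none => []
  | some (x, y) =>
    [(x, y + 1), (x + 1, y), (x, y - 1), (x - 1, y)].foldl (fun out c =>
      if 0 ≤ c.1 ∧ c.1 < width ∧ 0 ≤ c.2 ∧ c.2 < height ∧
          pvCell maze c.2 c.1 ≠ some '#' ∧ c ∉ p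
      then out ++ [p ++ [c]]
      else out) []

-- 'while frontier' level loop; the Nat fuel is a totality guard only (H·W+2 levels are proved
-- sufficient below on Pre_ inputs: frontier paths are simple, so at most H·W+1 levels exist)
def pvLevelsB (maze : List String) (width height ex ey : Int) :
    Nat → List (List (Int × Int)) → List (Int × Int)
  | 0, _ => PySem.Set.empty
  | Nat.succ f, frontier =>
    if frontier = [] then PySem.Set.empty
    else
      let done := frontier.filter (fun p => decide (p.getLast? = some (ex, ey)))
      if done = [] then
        pvLevelsB maze width height ex ey f (frontier.flatMap (pvStepsB maze width height))
      else
        done.foldl (fun s p => PySem.Set.update s p) PySem.Set.empty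

def find_best_paths_alt (maze : List String) : List (Int × Int) :=
  let height : Int := PySem.List.len maze
  let width : Int := PySem.Str.len (maze.headD "")
  let se := pvScanB maze width
  pvLevelsB maze width height se.2.1 se.2.2
    (maze.length * (maze.headD "").toList.length + 2)
    [[(se.1.1, se.1.2)]]

-- ===== PRECONDITION & SPEC =====
-- Pre_ excludes exactly the inputs where A raises IndexError: the empty maze (maze[0]) and
-- ragged mazes whose later row is shorter than the first (the S/E scan indexes every x < len(maze[0])).
def Pre_find_best_paths (maze : List String) : Prop :=
  maze ≠ [] ∧ ∀ row ∈ maze, (maze.headD "").toList.length ≤ row.toList.length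
instance (maze : List String) : Decidable (Pre_find_best_paths maze) := by
  unfold Pre_find_best_paths; infer_instance

def pvWitness_find_best_paths : List String := ["S.E", "#.#"]

def Spec_find_best_paths (maze : List String) (out : List (Int × Int)) : Prop := out = find_best_paths_alt maze
instance (maze : List String) (out : List (Int × Int)) : Decidable (Spec_find_best_paths maze out) := by unfold Spec_find_best_paths; infer_instance

-- ===== CLAIM (what is proved, stated in full; the proofs are below) =====
def Claim_equal_find_best_paths : Prop := ∀ (maze : List String), Dom_find_best_paths maze → Pre_find_best_paths maze → Spec_find_best_paths maze (find_best_paths maze)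

-- ===== LEMMAS AND PROOFS =====

def pvPath (t : Int × Int × List (Int × Int)) : List (Int × Int) := t.2.2
def pvEndsB (ex ey : Int) (t : Int × Int × List (Int × Int)) : Bool := decide (t.1 = ex ∧ t.2.1 = ey)
def pvExpandT (maze : List String) (w h : Int) (F : List (Int × Int × List (Int × Int))) :
    List (Int × Int × List (Int × Int)) :=
  F.flatMap (fun t => pvChildrenA maze w h t.1 t.2.1 t.2.2)

lemma pvLoopA_nil (maze : List String) (w h ex ey : Int) (f : Nat) (m : Option Nat)
    (b : List (List (Int × Int))) : pvLoopA maze w h ex ey f [] m b = b := by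
  cases f <;> rfl

lemma pvExpandT_cons (maze : List String) (w h : Int) (t : Int × Int × List (Int × Int))
    (F : List (Int × Int × List (Int × Int))) :
    pvExpandT maze w h (t :: F) = pvChildrenA maze w h t.1 t.2.1 t.2.2 ++ pvExpandT maze w h F := by
  simp [pvExpandT]

lemma pvPassNone (maze : List String) (w h ex ey : Int) :
    ∀ (F R : List (Int × Int × List (Int × Int))) (f : Nat) (b : List (List (Int × Int))),
      (∀ t ∈ F, ¬(t.1 = ex ∧ t.2.1 = ey)) →
      pvLoopA maze w h ex ey (F.length + f) (F ++ R) none b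
        = pvLoopA maze w h ex ey f (R ++ pvExpandT maze w h F) none b := by
  intro F
  induction F with
  | nil => intro R f b _; simp [pvExpandT]
  | cons t F ih =>
    intro R f b hF
    obtain ⟨x, y, p⟩ := t
    have hne : ¬(x = ex ∧ y = ey) := hF (x, y, p) (by simp)
    rw [show (((x, y, p) :: F).length + f) = Nat.succ (F.length + f) by simp; omega,
        List.cons_append, pvLoopA, if_neg hne]
    rw [List.append_assoc, ih (R ++ pvChildrenA maze w h x y p) f b
        (fun t ht => hF t (List.mem_cons_of_mem _ ht))]
    rw [pvExpandT_cons, List.append_assoc]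

lemma pvPassSome (maze : List String) (w h ex ey : Int) (k : Nat) :
    ∀ (F R : List (Int × Int × List (Int × Int))) (f : Nat) (b : List (List (Int × Int))),
      (∀ t ∈ F, t.2.2.length = k) →
      pvLoopA maze w h ex ey (F.length + f) (F ++ R) (some k) b
        = pvLoopA maze w h ex ey f
            (R ++ pvExpandT maze w h (F.filter (fun t => !pvEndsB ex ey t))) (some k)
            (b ++ (F.filter (pvEndsB ex ey)).map pvPath) := by
  intro F
  induction F with
  | nil => intro R f b _; simp [pvExpandT]
  | cons t F ih =>
    intro R f b hF
    obtain ⟨x, y, p⟩ := t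
    have hlen : p.length = k := hF (x, y, p) (by simp)
    rw [show (((x, y, p) :: F).length + f) = Nat.succ (F.length + f) by simp; omega,
        List.cons_append, pvLoopA]
    by_cases hE : x = ex ∧ y = ey
    · rw [if_pos hE, if_neg (by omega : ¬ (p.length < k)), if_pos hlen]
      rw [ih R f (b ++ [p]) (fun t ht => hF t (List.mem_cons_of_mem _ ht))]
      have h1 : pvEndsB ex ey (x, y, p) = true := decide_eq_true hE
      rw [show ((x, y, p) :: F).filter (fun t => !pvEndsB ex ey t)
            = F.filter (fun t => !pvEndsB ex ey t) by simp [h1]]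
      rw [show ((x, y, p) :: F).filter (pvEndsB ex ey)
            = (x, y, p) :: F.filter (pvEndsB ex ey) by simp [h1]]
      simp [pvPath]
    · rw [if_neg hE]
      have h1 : pvEndsB ex ey (x, y, p) = false := decide_eq_false hE
      rw [if_neg (by omega : ¬ (k < p.length))]
      rw [List.append_assoc, ih (R ++ pvChildrenA maze w h x y p) f b
          (fun t ht => hF t (List.mem_cons_of_mem _ ht))]
      rw [show ((x, y, p) :: F).filter (fun t => !pvEndsB ex ey t)
            = (x, y, p) :: F.filter (fun t => !pvEndsB ex ey t) by simp [h1]]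
      rw [show ((x, y, p) :: F).filter (pvEndsB ex ey)
            = F.filter (pvEndsB ex ey) by simp [h1]]
      rw [pvExpandT_cons, List.append_assoc]

lemma pvDrain (maze : List String) (w h ex ey : Int) (k : Nat) :
    ∀ (Q : List (Int × Int × List (Int × Int))) (f : Nat) (b : List (List (Int × Int))),
      (∀ t ∈ Q, k < t.2.2.length) →
      pvLoopA maze w h ex ey (Q.length + f) Q (some k) b = b := by
  intro Q
  induction Q with
  | nil => intro f b _; exact pvLoopA_nil _ _ _ _ _ _ _ _
  | cons t Q ih =>
    intro f b hQ
    obtain ⟨x, y, p⟩ := t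
    have hlen : k < p.length := hQ (x, y, p) (by simp)
    rw [show (((x, y, p) :: Q).length + f) = Nat.succ (Q.length + f) by simp; omega, pvLoopA]
    by_cases hE : x = ex ∧ y = ey
    · rw [if_pos hE, if_neg (by omega : ¬ (p.length < k)), if_neg (by omega : ¬ (p.length = k))]
      exact ih f b (fun t ht => hQ t (List.mem_cons_of_mem _ ht))
    · rw [if_neg hE, if_pos hlen]
      exact ih f b (fun t ht => hQ t (List.mem_cons_of_mem _ ht))
def pvCands (x y : Int) : List (Int × Int) := [(x, y + 1), (x + 1, y), (x, y - 1), (x - 1, y)]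
def pvOk (maze : List String) (w h : Int) (p : List (Int × Int)) (c : Int × Int) : Bool :=
  decide (0 ≤ c.1 ∧ c.1 < w ∧ 0 ≤ c.2 ∧ c.2 < h ∧ pvCell maze c.2 c.1 ≠ some '#' ∧ c ∉ p)

lemma pvFoldlIteApp {α β : Type} (l : List α) (P : α → Prop) [DecidablePred P] (f : α → β)
    (acc : List β) :
    l.foldl (fun q a => if P a then q ++ [f a] else q) acc
      = acc ++ (l.filter fun a => decide (P a)).map f := by
  induction l generalizing acc with
  | nil => simp
  | cons a l ih => by_cases h : P a <;> simp [h, ih]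

lemma pvCands_eq (x y : Int) : pvCands x y = pvDirs.map (fun d => (x + d.1, y + d.2)) := by
  norm_num [pvCands, pvDirs]
  constructor <;> ring

lemma pvChildrenA_eq (maze : List String) (w h x y : Int) (p : List (Int × Int)) :
    pvChildrenA maze w h x y p
      = ((pvCands x y).filter (pvOk maze w h p)).map (fun c => (c.1, c.2, p ++ [c])) := by
  have e : pvChildrenA maze w h x y p
      = pvDirs.foldl (fun q d =>
          if (0 ≤ x + d.1 ∧ x + d.1 < w ∧ 0 ≤ y + d.2 ∧ y + d.2 < h ∧
              pvCell maze (y + d.2) (x + d.1) ≠ some '#' ∧ (x + d.1, y + d.2) ∉ p)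
          then q ++ [(x + d.1, y + d.2, p ++ [(x + d.1, y + d.2)])] else q) [] := rfl
  rw [e, pvFoldlIteApp, pvCands_eq, List.filter_map, List.map_map]
  rfl

lemma pvChildren_mem (maze : List String) (w h x y : Int) (p : List (Int × Int))
    (t : Int × Int × List (Int × Int)) (ht : t ∈ pvChildrenA maze w h x y p) :
    ∃ c, t = (c.1, c.2, p ++ [c]) := by
  rw [pvChildrenA_eq] at ht
  obtain ⟨c, _, rfl⟩ := List.mem_map.mp ht
  exact ⟨c, rfl⟩

lemma pvChildren_len (maze : List String) (w h x y : Int) (p : List (Int × Int))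
    (t : Int × Int × List (Int × Int)) (ht : t ∈ pvChildrenA maze w h x y p) :
    t.2.2.length = p.length + 1 := by
  obtain ⟨c, rfl⟩ := pvChildren_mem maze w h x y p t ht
  simp

lemma pvExpandT_len (maze : List String) (w h : Int) (k : Nat)
    (F : List (Int × Int × List (Int × Int))) (hF : ∀ t ∈ F, t.2.2.length = k)
    (t : Int × Int × List (Int × Int)) (ht : t ∈ pvExpandT maze w h F) :
    t.2.2.length = k + 1 := by
  obtain ⟨t', ht', htc⟩ := List.mem_flatMap.mp ht
  rw [pvChildren_len maze w h t'.1 t'.2.1 t'.2.2 t htc, hF t' ht']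

lemma pvELevel (maze : List String) (w h ex ey : Int) (k : Nat) :
    ∀ (F R : List (Int × Int × List (Int × Int))) (f : Nat),
      (∀ t ∈ F, t.2.2.length = k) →
      (∃ t ∈ F, pvEndsB ex ey t = true) → (∀ t ∈ R, k < t.2.2.length) →
      pvLoopA maze w h ex ey
          (F.length + (R.length + (pvExpandT maze w h (F.filter (fun t => !pvEndsB ex ey t))).length + f))
          (F ++ R) none []
        = (F.filter (pvEndsB ex ey)).map pvPath := by
  intro F
  induction F with
  | nil => intro R f _ hex _; simp at hex
  | cons t F ih =>
    intro R f hF hex hR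
    obtain ⟨x, y, p⟩ := t
    have hlen : p.length = k := hF (x, y, p) (by simp)
    by_cases hE : x = ex ∧ y = ey
    · have h1 : pvEndsB ex ey (x, y, p) = true := decide_eq_true hE
      have hfe : ((x, y, p) :: F).filter (fun t => !pvEndsB ex ey t)
          = F.filter (fun t => !pvEndsB ex ey t) := by simp [h1]
      rw [hfe]
      rw [show (((x, y, p) :: F).length +
            (R.length + (pvExpandT maze w h (F.filter (fun t => !pvEndsB ex ey t))).length + f))
          = Nat.succ (F.length +
            (R.length + (pvExpandT maze w h (F.filter (fun t => !pvEndsB ex ey t))).length + f))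
          by simp; omega, List.cons_append, pvLoopA, if_pos hE, hlen]
      rw [pvPassSome maze w h ex ey k F R _ [p]
          (fun t ht => hF t (List.mem_cons_of_mem _ ht))]
      have hQ : ∀ t ∈ R ++ pvExpandT maze w h (F.filter (fun t => !pvEndsB ex ey t)),
          k < t.2.2.length := by
        intro t ht
        rcases List.mem_append.mp ht with h' | h'
        · exact hR t h'
        · have := pvExpandT_len maze w h k (F.filter (fun t => !pvEndsB ex ey t))
            (fun t ht' => hF t (List.mem_cons_of_mem _ (List.mem_of_mem_filter ht'))) t h'
          omega
      rw [show R.length + (pvExpandT maze w h (F.filter (fun t => !pvEndsB ex ey t))).length + f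
          = (R ++ pvExpandT maze w h (F.filter (fun t => !pvEndsB ex ey t))).length + f
          by simp]
      rw [pvDrain maze w h ex ey k _ f _ hQ]
      rw [show ((x, y, p) :: F).filter (pvEndsB ex ey)
            = (x, y, p) :: F.filter (pvEndsB ex ey) by simp [h1]]
      simp [pvPath]
    · have h1 : pvEndsB ex ey (x, y, p) = false := decide_eq_false hE
      have hfe : ((x, y, p) :: F).filter (fun t => !pvEndsB ex ey t)
          = (x, y, p) :: F.filter (fun t => !pvEndsB ex ey t) := by simp [h1]
      rw [hfe, pvExpandT_cons]
      rw [show (((x, y, p) :: F).length +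
            (R.length + (pvChildrenA maze w h x y p ++
              pvExpandT maze w h (F.filter (fun t => !pvEndsB ex ey t))).length + f))
          = Nat.succ (F.length +
            ((R ++ pvChildrenA maze w h x y p).length +
              (pvExpandT maze w h (F.filter (fun t => !pvEndsB ex ey t))).length + f))
          by simp; omega, List.cons_append, pvLoopA, if_neg hE]
      rw [List.append_assoc]
      rw [ih (R ++ pvChildrenA maze w h x y p) f
          (fun t ht => hF t (List.mem_cons_of_mem _ ht))
          (by rcases hex with ⟨t', ht', he'⟩
              rcases List.mem_cons.mp ht' with rfl | h'
              · rw [h1] at he'; cases he'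
              · exact ⟨t', h', he'⟩)
          (by intro t ht
              rcases List.mem_append.mp ht with h' | h'
              · exact hR t h'
              · have := pvChildren_len maze w h x y p t h'
                omega)]
      rw [show ((x, y, p) :: F).filter (pvEndsB ex ey)
            = F.filter (pvEndsB ex ey) by simp [h1]]
def pvEndsP (ex ey : Int) (p : List (Int × Int)) : Bool := decide (p.getLast? = some (ex, ey))
def pvGood (t : Int × Int × List (Int × Int)) : Prop := t.2.2.getLast? = some (t.1, t.2.1)
def pvExpandP (maze : List String) (w h : Int) (fr : List (List (Int × Int))) :
    List (List (Int × Int)) :=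
  fr.flatMap (pvStepsB maze w h)

lemma pvStepsB_eq (maze : List String) (w h x y : Int) (p : List (Int × Int))
    (hp : p.getLast? = some (x, y)) :
    pvStepsB maze w h p = ((pvCands x y).filter (pvOk maze w h p)).map (fun c => p ++ [c]) := by
  have e : pvStepsB maze w h p
      = (pvCands x y).foldl (fun out c =>
          if (0 ≤ c.1 ∧ c.1 < w ∧ 0 ≤ c.2 ∧ c.2 < h ∧
              pvCell maze c.2 c.1 ≠ some '#' ∧ c ∉ p)
          then out ++ [p ++ [c]] else out) [] := by
    rw [pvStepsB, hp]
    simp only [pvCands]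
  rw [e, pvFoldlIteApp]
  rfl

lemma pvSteps_children (maze : List String) (w h : Int) (t : Int × Int × List (Int × Int))
    (ht : pvGood t) :
    pvStepsB maze w h t.2.2 = (pvChildrenA maze w h t.1 t.2.1 t.2.2).map pvPath := by
  obtain ⟨x, y, p⟩ := t
  rw [pvStepsB_eq maze w h x y p ht, pvChildrenA_eq, List.map_map]
  rfl

lemma pvSteps_mem (maze : List String) (w h : Int) (p q : List (Int × Int))
    (hq : q ∈ pvStepsB maze w h p) :
    ∃ c, q = p ++ [c] ∧ pvOk maze w h p c = true := by
  rcases hl : p.getLast? with _ | ⟨x, y⟩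
  · rw [pvStepsB, hl] at hq; cases hq
  · rw [pvStepsB_eq maze w h x y p hl] at hq
    obtain ⟨c, hc, rfl⟩ := List.mem_map.mp hq
    exact ⟨c, rfl, List.of_mem_filter hc⟩

lemma pvEnds_corr (ex ey : Int) (t : Int × Int × List (Int × Int)) (ht : pvGood t) :
    pvEndsP ex ey (pvPath t) = pvEndsB ex ey t := by
  obtain ⟨x, y, p⟩ := t
  simp only [pvEndsP, pvEndsB, pvPath, pvGood] at *
  simp [ht, Prod.ext_iff]

lemma pvFilter_corr (ex ey : Int) (F : List (Int × Int × List (Int × Int)))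
    (hG : ∀ t ∈ F, pvGood t) :
    (F.map pvPath).filter (pvEndsP ex ey) = (F.filter (pvEndsB ex ey)).map pvPath := by
  rw [List.filter_map]
  congr 1
  exact List.filter_congr (fun t ht => by simp [Function.comp, pvEnds_corr ex ey t (hG t ht)])

lemma pvFilterNeg_corr (ex ey : Int) (F : List (Int × Int × List (Int × Int)))
    (hG : ∀ t ∈ F, pvGood t) :
    (F.map pvPath).filter (fun p => !pvEndsP ex ey p)
      = (F.filter (fun t => !pvEndsB ex ey t)).map pvPath := by
  rw [List.filter_map]
  congr 1
  exact List.filter_congr (fun t ht => by simp [Function.comp, pvEnds_corr ex ey t (hG t ht)])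

lemma pvExpand_corr (maze : List String) (w h : Int)
    (F : List (Int × Int × List (Int × Int))) (hG : ∀ t ∈ F, pvGood t) :
    (pvExpandT maze w h F).map pvPath = pvExpandP maze w h (F.map pvPath) := by
  induction F with
  | nil => rfl
  | cons t F ih =>
    rw [pvExpandT_cons]
    simp only [List.map_append, List.map_cons, pvExpandP, List.flatMap_cons]
    rw [← pvSteps_children maze w h t (hG t (by simp))]
    rw [ih (fun t' ht' => hG t' (List.mem_cons_of_mem _ ht'))]
    rfl

lemma pvExpandT_good (maze : List String) (w h : Int)
    (F : List (Int × Int × List (Int × Int))) (t : Int × Int × List (Int × Int))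
    (ht : t ∈ pvExpandT maze w h F) : pvGood t := by
  obtain ⟨t', _, htc⟩ := List.mem_flatMap.mp ht
  obtain ⟨c, rfl⟩ := pvChildren_mem maze w h t'.1 t'.2.1 t'.2.2 t htc
  simp [pvGood]
def pvNeed (maze : List String) (w h ex ey : Int) : Nat → List (List (Int × Int)) → Nat
  | 0, _ => 0
  | Nat.succ f, fr =>
    if fr = [] then 0
    else if fr.filter (pvEndsP ex ey) = [] then
      fr.length + pvNeed maze w h ex ey f (pvExpandP maze w h fr)
    else
      fr.length + (pvExpandP maze w h (fr.filter (fun p => !pvEndsP ex ey p))).length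
def pvTerm (maze : List String) (w h ex ey : Int) : Nat → List (List (Int × Int)) → Prop
  | 0, fr => fr = []
  | Nat.succ f, fr => fr = [] ∨ fr.filter (pvEndsP ex ey) ≠ [] ∨
      pvTerm maze w h ex ey f (pvExpandP maze w h fr)

lemma pvLevelsB_succ (maze : List String) (w h ex ey : Int) (f : Nat)
    (fr : List (List (Int × Int))) (hfr : fr ≠ []) :
    pvLevelsB maze w h ex ey (Nat.succ f) fr
      = if fr.filter (pvEndsP ex ey) = [] then
          pvLevelsB maze w h ex ey f (pvExpandP maze w h fr)
        else pvTilesA (fr.filter (pvEndsP ex ey)) := by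
  rw [pvLevelsB, if_neg hfr]
  rfl

lemma pvExpandP_len_mem (maze : List String) (w h : Int) (k : Nat)
    (fr : List (List (Int × Int))) (hfr : ∀ p ∈ fr, p.length = k)
    (q : List (Int × Int)) (hq : q ∈ pvExpandP maze w h fr) : q.length = k + 1 := by
  obtain ⟨p, hp, hqs⟩ := List.mem_flatMap.mp hq
  obtain ⟨c, rfl, -⟩ := pvSteps_mem maze w h p q hqs
  simp [hfr p hp]

lemma pvPassNone' (maze : List String) (w h ex ey : Int)
    (F : List (Int × Int × List (Int × Int))) (f : Nat) (b : List (List (Int × Int)))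
    (hF : ∀ t ∈ F, ¬(t.1 = ex ∧ t.2.1 = ey)) :
    pvLoopA maze w h ex ey (F.length + f) F none b
      = pvLoopA maze w h ex ey f (pvExpandT maze w h F) none b := by
  have := pvPassNone maze w h ex ey F [] f b hF
  simpa using this

lemma pvELevel' (maze : List String) (w h ex ey : Int) (k : Nat)
    (F : List (Int × Int × List (Int × Int))) (f : Nat)
    (hF : ∀ t ∈ F, t.2.2.length = k) (hex : ∃ t ∈ F, pvEndsB ex ey t = true) :
    pvLoopA maze w h ex ey
        (F.length + ((pvExpandT maze w h (F.filter (fun t => !pvEndsB ex ey t))).length + f))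
        F none []
      = (F.filter (pvEndsB ex ey)).map pvPath := by
  have := pvELevel maze w h ex ey k F [] f hF hex (by intro t ht; cases ht)
  simpa using this

lemma pvMain5 (maze : List String) (w h ex ey : Int) :
    ∀ (f : Nat) (F : List (Int × Int × List (Int × Int))) (fr : List (List (Int × Int)))
      (k : Nat) (rest : Nat),
      F.map pvPath = fr → (∀ t ∈ F, pvGood t) → (∀ p ∈ fr, p.length = k) →
      pvTerm maze w h ex ey f fr →
      pvTilesA (pvLoopA maze w h ex ey (pvNeed maze w h ex ey f fr + rest) F none [])
        = pvLevelsB maze w h ex ey f fr := by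
  intro f
  induction f with
  | zero =>
    intro F fr k rest hmap hG hlen hT
    have hfr : fr = [] := hT
    subst hfr
    have hF : F = [] := List.map_eq_nil_iff.mp hmap
    subst hF
    rw [pvLoopA_nil]
    rfl
  | succ f ih =>
    intro F fr k rest hmap hG hlen hT
    by_cases hfr : fr = []
    · subst hfr
      have hF : F = [] := List.map_eq_nil_iff.mp hmap
      subst hF
      rw [show pvNeed maze w h ex ey (Nat.succ f) [] = 0 from by rw [pvNeed]; simp]
      rw [pvLoopA_nil]
      rw [pvLevelsB, if_pos rfl]
      rfl
    · rw [pvLevelsB_succ maze w h ex ey f fr hfr]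
      by_cases hdone : fr.filter (pvEndsP ex ey) = []
      · rw [if_pos hdone]
        rw [show pvNeed maze w h ex ey (Nat.succ f) fr
            = fr.length + pvNeed maze w h ex ey f (pvExpandP maze w h fr) from by
          rw [pvNeed, if_neg hfr, if_pos hdone]]
        have hnoend : ∀ t ∈ F, ¬(t.1 = ex ∧ t.2.1 = ey) := by
          intro t ht hc
          have : pvPath t ∈ fr.filter (pvEndsP ex ey) := by
            rw [← hmap, pvFilter_corr ex ey F hG]
            exact List.mem_map_of_mem (List.mem_filter.mpr ⟨ht, decide_eq_true hc⟩)
          rw [hdone] at this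
          cases this
        have hflen : fr.length = F.length := by rw [← hmap, List.length_map]
        rw [show fr.length + pvNeed maze w h ex ey f (pvExpandP maze w h fr) + rest
            = F.length + (pvNeed maze w h ex ey f (pvExpandP maze w h fr) + rest) from by
          omega]
        rw [pvPassNone' maze w h ex ey F _ _ hnoend]
        have hexp : (pvExpandT maze w h F).map pvPath = pvExpandP maze w h fr := by
          rw [pvExpand_corr maze w h F hG, hmap]
        exact ih (pvExpandT maze w h F) (pvExpandP maze w h fr) (k + 1) rest hexp
          (fun t ht => pvExpandT_good maze w h F t ht)
          (pvExpandP_len_mem maze w h k fr hlen)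
          (by rcases hT with h' | h' | h'
              · exact absurd h' hfr
              · exact absurd hdone h'
              · exact h')
      · rw [if_neg hdone]
        have hexend : ∃ t ∈ F, pvEndsB ex ey t = true := by
          rcases List.exists_mem_of_ne_nil _ hdone with ⟨p, hp⟩
          rw [← hmap, pvFilter_corr ex ey F hG] at hp
          obtain ⟨t, ht, -⟩ := List.mem_map.mp hp
          exact ⟨t, List.mem_filter.mp ht |>.1, List.mem_filter.mp ht |>.2⟩
        have hFlen : ∀ t ∈ F, t.2.2.length = k := by
          intro t ht
          exact hlen (pvPath t) (hmap ▸ List.mem_map_of_mem ht)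
        have hexpc : pvExpandP maze w h (fr.filter (fun p => !pvEndsP ex ey p))
            = (pvExpandT maze w h (F.filter (fun t => !pvEndsB ex ey t))).map pvPath := by
          rw [pvExpand_corr maze w h _ (fun t ht => hG t (List.mem_of_mem_filter ht))]
          rw [← pvFilterNeg_corr ex ey F hG, hmap]
        rw [show pvNeed maze w h ex ey (Nat.succ f) fr
            = fr.length + (pvExpandP maze w h (fr.filter (fun p => !pvEndsP ex ey p))).length from by
          rw [pvNeed, if_neg hfr, if_neg hdone]]
        rw [hexpc, List.length_map]
        have hflen : fr.length = F.length := by rw [← hmap, List.length_map]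
        rw [show fr.length + (pvExpandT maze w h (F.filter (fun t => !pvEndsB ex ey t))).length + rest
            = F.length + ((pvExpandT maze w h (F.filter (fun t => !pvEndsB ex ey t))).length + rest) from by
          omega]
        rw [pvELevel' maze w h ex ey k F rest hFlen hexend]
        rw [← pvFilter_corr ex ey F hG, hmap]
  
lemma pvStepsLen (maze : List String) (w h : Int) (p : List (Int × Int)) :
    (pvStepsB maze w h p).length ≤ 4 := by
  rcases hl : p.getLast? with _ | ⟨x, y⟩
  · rw [pvStepsB, hl]; simp
  · rw [pvStepsB_eq maze w h x y p hl, List.length_map]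
    calc ((pvCands x y).filter (pvOk maze w h p)).length ≤ (pvCands x y).length :=
          List.length_filter_le _ _
      _ = 4 := rfl

lemma pvExpandPLen (maze : List String) (w h : Int) (fr : List (List (Int × Int))) :
    (pvExpandP maze w h fr).length ≤ 4 * fr.length := by
  induction fr with
  | nil => simp [pvExpandP]
  | cons p fr ih =>
    have h1 := pvStepsLen maze w h p
    simp only [pvExpandP, List.flatMap_cons, List.length_append, List.length_cons] at *
    omega

lemma pvNeedBound (maze : List String) (w h ex ey : Int) :
    ∀ (f : Nat) (fr : List (List (Int × Int))),
      pvNeed maze w h ex ey f fr ≤ fr.length * 5 ^ f := by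
  intro f
  induction f with
  | zero => intro fr; rw [pvNeed]; simp
  | succ f ih =>
    intro fr
    have h5 : 1 ≤ 5 ^ f := Nat.one_le_pow _ _ (by norm_num)
    rw [pvNeed]
    by_cases hfr : fr = []
    · rw [if_pos hfr]; exact Nat.zero_le _
    · rw [if_neg hfr]
      by_cases hdone : fr.filter (pvEndsP ex ey) = []
      · rw [if_pos hdone]
        have h1 := ih (pvExpandP maze w h fr)
        have h2 := pvExpandPLen maze w h fr
        have h3 : (pvExpandP maze w h fr).length * 5 ^ f ≤ 4 * fr.length * 5 ^ f :=
          Nat.mul_le_mul_right _ h2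
        have : 5 ^ (f + 1) = 5 * 5 ^ f := by ring
        rw [pow_succ]
        nlinarith
      · rw [if_neg hdone]
        have h2 := pvExpandPLen maze w h (fr.filter (fun p => !pvEndsP ex ey p))
        have h3 : (fr.filter (fun p => !pvEndsP ex ey p)).length ≤ fr.length :=
          List.length_filter_le _ _
        rw [pow_succ]
        nlinarith

def pvInGrid (w h : Int) (c : Int × Int) : Prop :=
  0 ≤ c.1 ∧ c.1 < w ∧ 0 ≤ c.2 ∧ c.2 < h

def pvInv (w h : Int) (k : Nat) (p : List (Int × Int)) : Prop :=
  p.Nodup ∧ p.length = k ∧ ∀ c ∈ p, pvInGrid w h c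

lemma pvPigeon (w h : Int) (p : List (Int × Int)) (hnd : p.Nodup)
    (hg : ∀ c ∈ p, pvInGrid w h c) : p.length ≤ w.toNat * h.toNat := by
  classical
  have hsub : p.toFinset ⊆ (Finset.Ico 0 w) ×ˢ (Finset.Ico 0 h) := by
    intro c hc
    have := hg c (List.mem_toFinset.mp hc)
    obtain ⟨h1, h2, h3, h4⟩ := this
    simp [Finset.mem_product, Finset.mem_Ico]
    exact ⟨⟨h1, h2⟩, h3, h4⟩
  have hcard := Finset.card_le_card hsub
  rw [List.toFinset_card_of_nodup hnd] at hcard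
  simpa [Int.card_Ico] using hcard

lemma pvInvStep (maze : List String) (w h : Int) (k : Nat) (p q : List (Int × Int))
    (hp : pvInv w h k p) (hq : q ∈ pvStepsB maze w h p) : pvInv w h (k + 1) q := by
  obtain ⟨c, rfl, hok⟩ := pvSteps_mem maze w h p q hq
  obtain ⟨hnd, hlen, hg⟩ := hp
  have hok' := of_decide_eq_true hok
  obtain ⟨h1, h2, h3, h4, -, h6⟩ := hok'
  refine ⟨?_, by simp [hlen], ?_⟩
  · rw [List.nodup_append]
    exact ⟨hnd, List.nodup_singleton _, by intro a ha b hb heq; rw [List.mem_singleton] at hb; exact h6 (by rw [heq, hb] at ha; exact ha)⟩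
  · intro c' hc'
    rcases List.mem_append.mp hc' with h' | h'
    · exact hg c' h'
    · simp at h'
      subst h'
      exact ⟨h1, h2, h3, h4⟩

lemma pvTermLemma (maze : List String) (w h ex ey : Int) :
    ∀ (f k : Nat) (fr : List (List (Int × Int))),
      (∀ p ∈ fr, pvInv w h k p) → w.toNat * h.toNat < k + f →
      pvTerm maze w h ex ey f fr := by
  intro f
  induction f with
  | zero =>
    intro k fr hinv hb
    rw [pvTerm]
    rcases fr with _ | ⟨p, fr⟩
    · rfl
    · obtain ⟨hnd, hlen, hg⟩ := hinv p (by simp)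
      have := pvPigeon w h p hnd hg
      omega
  | succ f ih =>
    intro k fr hinv hb
    rw [pvTerm]
    by_cases hfr : fr = []
    · exact Or.inl hfr
    · by_cases hdone : fr.filter (pvEndsP ex ey) = []
      · refine Or.inr (Or.inr (ih (k + 1) _ ?_ (by omega)))
        intro q hq
        obtain ⟨p, hp, hqs⟩ := List.mem_flatMap.mp hq
        exact pvInvStep maze w h k p q (hinv p hp) hqs
      · exact Or.inr (Or.inl hdone)

lemma pvScanRow_eq (maze : List String) (y : Int) (row : String)
    (hrow? : PySem.List.pyGet? maze y = some row) (w : Int) (hw0 : 0 ≤ w)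
    (hwrow : w.toNat ≤ row.toList.length) (st : (Int × Int) × (Int × Int)) :
    (PySem.List.pyRange 0 w).foldl (fun st x =>
      if pvCell maze y x = some 'S' then ((x, y), st.2)
      else if pvCell maze y x = some 'E' then (st.1, (x, y))
      else st) st
    = (PySem.List.enumerate (row.toList.take w.toNat)).foldl (fun st xc =>
      if xc.2 = 'S' then ((xc.1, y), st.2)
      else if xc.2 = 'E' then (st.1, (xc.1, y))
      else st) st := by
  have hTlen : (row.toList.take w.toNat).length = w.toNat := by
    rw [List.length_take]; omega
  rw [PySem.List.enumerate_eq_map_pyRange (row.toList.take w.toNat) 'A', List.foldl_map,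
    PySem.List.len_eq, hTlen, Int.toNat_of_nonneg hw0]
  apply PySem.List.foldl_congr_mem
  intro st' x hx
  rw [PySem.List.mem_pyRange_one] at hx
  have hxrow : x < (row.toList.length : Int) := by omega
  have hxT : x < ((row.toList.take w.toNat).length : Int) := by rw [hTlen]; omega
  have hcell : pvCell maze y x = some row.toList[x.toNat] := by
    rw [pvCell, hrow?, Option.bind_some, PySem.Str.pyGet?, PySem.Chars.pyGet?]
    exact PySem.List.pyGet?_eq_some_getElem row.toList hx.1 hxrow
  have hTx : PySem.List.pyGetD (row.toList.take w.toNat) x 'A' = row.toList[x.toNat] := by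
    rw [PySem.List.pyGetD_eq_getElem (row.toList.take w.toNat) 'A' hx.1 hxT]
    exact List.getElem_take
  rw [hcell, hTx]
  simp only [Option.some_inj]

lemma pvScan_eq (maze : List String)
    (hrows : ∀ row ∈ maze, (maze.headD "").toList.length ≤ row.toList.length) :
    pvScanA maze (PySem.List.len maze) (PySem.Str.len (maze.headD ""))
      = pvScanB maze (PySem.Str.len (maze.headD "")) := by
  rw [pvScanA, pvScanB, PySem.List.enumerate_eq_map_pyRange maze "", List.foldl_map,
    PySem.List.len_eq]
  apply PySem.List.foldl_congr_mem
  intro st y hy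
  rw [PySem.List.mem_pyRange_one] at hy
  have hrow? : PySem.List.pyGet? maze y = some maze[y.toNat] :=
    PySem.List.pyGet?_eq_some_getElem maze hy.1 hy.2
  have hrowD : PySem.List.pyGetD maze y "" = maze[y.toNat] :=
    PySem.List.pyGetD_eq_getElem maze "" hy.1 hy.2
  have hw0 : (0 : Int) ≤ PySem.Str.len (maze.headD "") := by
    rw [PySem.Str.len_eq]; positivity
  have hwrow : (PySem.Str.len (maze.headD "")).toNat ≤ maze[y.toNat].toList.length := by
    have h1 := hrows maze[y.toNat] (List.getElem_mem _)
    rw [PySem.Str.len_eq, Int.toNat_natCast]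
    exact h1
  rw [hrowD, PySem.List.slice_to _ hw0]
  exact pvScanRow_eq maze y maze[y.toNat] hrow? _ hw0 hwrow st
lemma pvScanB_bounds (maze : List String) (w : Int) (hw0 : 0 ≤ w) :
    ((pvScanB maze w).1 = (0, 0) ∨ pvInGrid w (maze.length : Int) (pvScanB maze w).1) ∧
    ((pvScanB maze w).2 = (0, 0) ∨ pvInGrid w (maze.length : Int) (pvScanB maze w).2) := by
  rw [pvScanB]
  refine List.foldlRecOn (motive := fun (st : (Int × Int) × (Int × Int)) =>
    (st.1 = (0, 0) ∨ pvInGrid w (maze.length : Int) st.1) ∧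
    (st.2 = (0, 0) ∨ pvInGrid w (maze.length : Int) st.2)) _ _ ⟨Or.inl rfl, Or.inl rfl⟩ ?_
  intro st hst yr hyr
  refine List.foldlRecOn (motive := fun (st : (Int × Int) × (Int × Int)) =>
      (st.1 = (0, 0) ∨ pvInGrid w (maze.length : Int) st.1) ∧
      (st.2 = (0, 0) ∨ pvInGrid w (maze.length : Int) st.2)) _ _ hst ?_
  intro st' hst' xc hxc
  obtain ⟨ky, hky, hyr'⟩ := (PySem.List.mem_enumerate_iff maze 0 yr).mp hyr
  obtain ⟨kx, hkx, hxc'⟩ :=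
    (PySem.List.mem_enumerate_iff (PySem.List.slice yr.2.toList none (some w)) 0 xc).mp hxc
  have hxlt : (kx : Int) < w := by
    have h1 : (PySem.List.slice yr.2.toList none (some w)).length ≤ w.toNat := by
      rw [PySem.List.slice_to _ hw0, List.length_take]
      omega
    omega
  have hgrid : pvInGrid w (maze.length : Int) (xc.1, yr.1) := by
    rw [hyr', hxc']
    refine ⟨by simp, by simpa using hxlt, by simp, by simp; omega⟩
  by_cases h1 : xc.2 = 'S'
  · rw [if_pos h1]
    exact ⟨Or.inr hgrid, hst'.2⟩
  · rw [if_neg h1]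
    by_cases h2 : xc.2 = 'E'
    · rw [if_pos h2]
      exact ⟨hst'.1, Or.inr hgrid⟩
    · rw [if_neg h2]
      exact hst'

lemma pvScanB_zero (maze : List String) : pvScanB maze 0 = ((0, 0), (0, 0)) := by
  rw [pvScanB]
  rw [PySem.List.foldl_congr_mem _ _ (fun st _ => st) _ (by
    intro st yr hyr
    rw [show PySem.List.slice yr.2.toList none (some 0) = [] from by
      rw [PySem.List.slice_to _ le_rfl]; simp]
    rfl)]
  exact PySem.List.foldl_ignore _ _

theorem find_best_paths_spec : Claim_equal_find_best_paths := by
  intro maze _hDom hPre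
  obtain ⟨hne, hrows⟩ := hPre
  unfold Spec_find_best_paths
  simp only [find_best_paths, find_best_paths_alt]
  rw [pvScan_eq maze hrows]
  rcases hscan : pvScanB maze (PySem.Str.len (maze.headD "")) with ⟨⟨sx, sy⟩, ex, ey⟩
  dsimp only
  simp only [PySem.List.len_eq]
  have hw0 : (0 : Int) ≤ PySem.Str.len (maze.headD "") := by
    rw [PySem.Str.len_eq]; positivity
  have hlen1 : (0 : Int) < (maze.length : Int) := by
    have : maze.length ≠ 0 := fun h => hne (List.eq_nil_of_length_eq_zero h)
    omega
  have hterm : pvTerm maze (PySem.Str.len (maze.headD "")) (maze.length : Int) ex ey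
      (maze.length * (maze.headD "").toList.length + 2) [[(sx, sy)]] := by
    by_cases hse : (sx, sy) = (ex, ey)
    · show [[(sx, sy)]] = [] ∨ _ ∨ _
      refine Or.inr (Or.inl ?_)
      simp [pvEndsP, hse]
    · have hb := pvScanB_bounds maze (PySem.Str.len (maze.headD "")) hw0
      rw [hscan] at hb
      have hgrid : pvInGrid (PySem.Str.len (maze.headD "")) (maze.length : Int) (sx, sy) := by
        rcases hb.1 with h0 | h
        · by_cases hwz : PySem.Str.len (maze.headD "") = 0
          · exfalso
            rw [hwz, pvScanB_zero] at hscan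
            injection hscan with h1 h2
            exact hse (by rw [← h1, ← h2])
          · obtain ⟨h1, h2⟩ := Prod.mk.injEq .. ▸ h0
            refine ⟨by omega, by omega, by omega, by omega⟩
        · exact h
      refine pvTermLemma maze _ _ ex ey _ 1 _ ?_ ?_
      · intro p hp
        rw [List.mem_singleton] at hp
        subst hp
        exact ⟨List.nodup_singleton _, rfl, by
          intro c hc
          rw [List.mem_singleton] at hc
          subst hc
          exact hgrid⟩
      · have he1 : (PySem.Str.len (maze.headD "")).toNat = (maze.headD "").toList.length := by
          rw [PySem.Str.len_eq]; exact Int.toNat_natCast _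
        have he2 : ((maze.length : Int)).toNat = maze.length := Int.toNat_natCast _
        rw [he1, he2]
        have : (maze.headD "").toList.length * maze.length
            = maze.length * (maze.headD "").toList.length := Nat.mul_comm _ _
        omega
  have hneed : pvNeed maze (PySem.Str.len (maze.headD "")) (maze.length : Int) ex ey
      (maze.length * (maze.headD "").toList.length + 2) [[(sx, sy)]]
      ≤ 5 ^ (maze.length * (maze.headD "").toList.length + 3) := by
    have h1 := pvNeedBound maze (PySem.Str.len (maze.headD "")) (maze.length : Int) ex ey
      (maze.length * (maze.headD "").toList.length + 2) [[(sx, sy)]]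
    have h2 : 5 ^ (maze.length * (maze.headD "").toList.length + 2)
        ≤ 5 ^ (maze.length * (maze.headD "").toList.length + 3) :=
      Nat.pow_le_pow_right (by norm_num) (by omega)
    rw [List.length_singleton, one_mul] at h1
    omega
  rw [show 5 ^ (maze.length * (maze.headD "").toList.length + 3)
      = pvNeed maze (PySem.Str.len (maze.headD "")) (maze.length : Int) ex ey
          (maze.length * (maze.headD "").toList.length + 2) [[(sx, sy)]]
        + (5 ^ (maze.length * (maze.headD "").toList.length + 3)
          - pvNeed maze (PySem.Str.len (maze.headD "")) (maze.length : Int) ex ey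
              (maze.length * (maze.headD "").toList.length + 2) [[(sx, sy)]]) from by omega]
  exact pvMain5 maze (PySem.Str.len (maze.headD "")) (maze.length : Int) ex ey
    (maze.length * (maze.headD "").toList.length + 2) [(sx, sy, [(sx, sy)])] [[(sx, sy)]] 1 _
    rfl
    (by intro t ht; rw [List.mem_singleton] at ht; subst ht; exact rfl)
    (by intro p hp; rw [List.mem_singleton] at hp; subst hp; rfl)
    hterm
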